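-- pv_equiv track=rewrite | github.com/bennyblair/bennyblair.github.io | process_word_documents.py | format_faqs
-- ===== SOURCE A (Python) =====
-- def format_faqs(content):
--     """Format FAQ content properly"""
--     formatted = []
--     lines = content.split('\n')
--     current_question = None
--     current_answer = []
--
--     for line in lines:
--         line = line.strip()
--         if not line:
--             continue
--         if line.endswith('?'):
--             if current_question:
--                 formatted.append(f"### {current_question}\n\n{' '.join(current_answer)}\n")
--             current_question = line
--             current_answer = []
--         else:
--             current_answer.append(line)
--
--     if current_question:
--         formatted.append(f"### {current_question}\n\n{' '.join(current_answer)}")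
--
--     return '\n'.join(formatted)
-- ===== SOURCE B (Python) =====
-- def format_faqs(content):
--     """Format FAQ content properly"""
--     # Staged passes: normalize lines, drop the pre-question prefix, then a
--     # recursive descent splits off each question's span of answer lines.
--     lines = [l for l in (r.strip() for r in content.split('\n')) if l]
--     while lines and not lines[0].endswith('?'):
--         lines = lines[1:]
--     return '\n\n'.join(_blocks(lines))
--
--
-- def _blocks(lines):
--     # lines is empty or starts with a question line
--     if not lines:
--         return []
--     q = lines[0]
--     ans = []
--     i = 1
--     while i < len(lines) and not lines[i].endswith('?'):
--         ans.append(lines[i])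
--         i += 1
--     return ['### {}\n\n{}'.format(q, ' '.join(ans))] + _blocks(lines[i:])
-- ===== Notes on version B (the rewrite author's own statement) =====
-- stated objective: alternative
-- what changed: B replaces A's stateful streaming loop (flush the pending question/answers whenever the next question arrives, plus a final flush with a different block string) by staged passes: normalize the lines, drop the pre-question prefix, then a recursive descent that repeatedly splits off the span of answer lines following each question, rendering every block uniformly and joining with blank lines.
import Mathlib
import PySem

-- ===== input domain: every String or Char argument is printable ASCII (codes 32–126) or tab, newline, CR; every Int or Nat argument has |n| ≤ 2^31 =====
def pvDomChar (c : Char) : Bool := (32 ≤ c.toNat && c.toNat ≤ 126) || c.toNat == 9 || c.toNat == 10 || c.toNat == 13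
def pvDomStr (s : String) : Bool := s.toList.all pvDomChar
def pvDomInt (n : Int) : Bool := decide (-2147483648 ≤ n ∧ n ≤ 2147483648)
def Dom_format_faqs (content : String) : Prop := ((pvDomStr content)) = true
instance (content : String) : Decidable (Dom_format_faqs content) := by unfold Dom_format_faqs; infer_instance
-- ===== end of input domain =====

-- B replaces A's streaming flush loop by staged passes (normalize lines, drop the
-- pre-question prefix, recursive descent over question/answer spans); objective: alternative.

-- ===== PORT A =====
-- A's loop state: (formatted, current_question, current_answer)
def pvStepA (st : List String × Option String × List String) (raw : String) :
    List String × Option String × List String :=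
  let line := PySem.Str.strip raw
  if line = "" then st
  else if PySem.Str.endswith line "?" then
    match st.2.1 with
    | some q =>
        (st.1 ++ ["### " ++ q ++ "\n\n" ++ PySem.Str.join " " st.2.2 ++ "\n"], some line, [])
    | none => (st.1, some line, [])
  else (st.1, st.2.1, st.2.2 ++ [line])

def format_faqs (content : String) : String :=
  let lines := (PySem.Str.split? content "\n").getD []   -- sep "\n" ≠ "": split? is always some
  let st := lines.foldl pvStepA ([], none, [])
  let formatted :=
    match st.2.1 with
    | some q => st.1 ++ ["### " ++ q ++ "\n\n" ++ PySem.Str.join " " st.2.2]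
    | none => st.1
  PySem.Str.join "\n" formatted

-- ===== PORT B =====
-- the inner while loop of _blocks: answers up to the next question, and the rest
def pvSpan : List String → List String × List String
  | [] => ([], [])
  | l :: ls =>
      if PySem.Str.endswith l "?" then ([], l :: ls)
      else (l :: (pvSpan ls).1, (pvSpan ls).2)

-- (termination helper for pvBlocks)
theorem pvSpan_snd_length_le (ls : List String) : (pvSpan ls).2.length ≤ ls.length := by
  induction ls with
  | nil => simp [pvSpan]
  | cons l ls ih =>
      simp only [pvSpan]
      split
      · simp
      · simpa using Nat.le_succ_of_le ih

def pvBlocks : List String → List String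
  | [] => []
  | q :: rest =>
      ("### " ++ q ++ "\n\n" ++ PySem.Str.join " " (pvSpan rest).1) :: pvBlocks (pvSpan rest).2
  termination_by ls => ls.length
  decreasing_by simpa using Nat.lt_succ_of_le (pvSpan_snd_length_le rest)

def format_faqs_alt (content : String) : String :=
  let lines := ((((PySem.Str.split? content "\n").getD []).map PySem.Str.strip).filter (· ≠ ""))
  let lines := lines.dropWhile (fun l => !PySem.Str.endswith l "?")
  PySem.Str.join "\n\n" (pvBlocks lines)

-- ===== PRECONDITION & SPEC =====
def Spec_format_faqs (content : String) (out : String) : Prop := out = format_faqs_alt content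
instance (content : String) (out : String) : Decidable (Spec_format_faqs content out) := by unfold Spec_format_faqs; infer_instance

-- ===== CLAIM =====
def Claim_equal_format_faqs : Prop := ∀ (content : String), Dom_format_faqs content → Spec_format_faqs content (format_faqs content)

-- ===== LEMMAS AND PROOFS =====

-- A's step on already-stripped nonempty lines
def pvStepA' (st : List String × Option String × List String) (l : String) :
    List String × Option String × List String :=
  if PySem.Str.endswith l "?" then
    match st.2.1 with
    | some q =>
        (st.1 ++ ["### " ++ q ++ "\n\n" ++ PySem.Str.join " " st.2.2 ++ "\n"], some l, [])
    | none => (st.1, some l, [])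
  else (st.1, st.2.1, st.2.2 ++ [l])

def pvBlock (q : String) (a : List String) : String :=
  "### " ++ q ++ "\n\n" ++ PySem.Str.join " " a

def pvFinish (st : List String × Option String × List String) : String :=
  PySem.Str.join "\n" (match st.2.1 with
    | some q => st.1 ++ [pvBlock q st.2.2]
    | none => st.1)

theorem pvFold_strip (ls : List String) (st : List String × Option String × List String) :
    ls.foldl pvStepA st = ((ls.map PySem.Str.strip).filter (· ≠ "")).foldl pvStepA' st := by
  induction ls generalizing st with
  | nil => rfl
  | cons raw ls ih =>
      simp only [List.foldl_cons, List.map_cons]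
      by_cases h : PySem.Str.strip raw = ""
      · rw [List.filter_cons_of_neg (by simpa using h)]
        have hs : pvStepA st raw = st := by simp [pvStepA, h]
        rw [hs, ih]
      · rw [List.filter_cons_of_pos (by simpa using h), List.foldl_cons]
        have hs : pvStepA st raw = pvStepA' st (PySem.Str.strip raw) := by
          simp [pvStepA, pvStepA', h]
        rw [hs, ih]

theorem pvBlocks_cons (q : String) (rest : List String) :
    pvBlocks (q :: rest) =
      ("### " ++ q ++ "\n\n" ++ PySem.Str.join " " (pvSpan rest).1) :: pvBlocks (pvSpan rest).2 := by
  rw [pvBlocks.eq_def]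

-- the two rendering schemes agree: trailing-'\n' blocks joined by '\n' = blocks joined by '\n\n'
theorem pvChars_join_lemma (l : List (List Char)) (x : List Char) :
    PySem.Chars.join ['\n'] (l.map (· ++ ['\n']) ++ [x]) =
      PySem.Chars.join ['\n', '\n'] (l ++ [x]) := by
  induction l with
  | nil => simp [PySem.Chars.join_singleton]
  | cons a l ih =>
      cases l with
      | nil =>
          simp [PySem.Chars.join_cons_cons, PySem.Chars.join_singleton]
      | cons b l' =>
          simp only [List.map_cons, List.cons_append] at ih ⊢
          rw [PySem.Chars.join_cons_cons, PySem.Chars.join_cons_cons, ih]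
          simp

theorem pvStr_join_lemma (l : List String) (x : String) :
    PySem.Str.join "\n" (l.map (· ++ "\n") ++ [x]) =
      PySem.Str.join "\n\n" (l ++ [x]) := by
  apply String.toList_inj.mp
  rw [PySem.Str.toList_join, PySem.Str.toList_join]
  have := pvChars_join_lemma (l.map String.toList) x.toList
  simpa [List.map_map, Function.comp_def] using this

-- main invariant: A's fold from a flushed state renders pre ++ the blocks of q's span
theorem pvL1 (ls : List String) : ∀ (pre : List String) (q : String) (ca : List String),
    pvFinish (ls.foldl pvStepA' (pre.map (· ++ "\n"), some q, ca)) =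
      PySem.Str.join "\n\n" (pre ++ (pvBlock q (ca ++ (pvSpan ls).1) :: pvBlocks (pvSpan ls).2)) := by
  induction ls with
  | nil =>
      intro pre q ca
      simp only [List.foldl_nil, pvFinish, pvSpan, pvBlocks, List.append_nil]
      exact pvStr_join_lemma pre (pvBlock q ca)
  | cons l ls ih =>
      intro pre q ca
      by_cases h : PySem.Chars.endswith l.toList ['?'] = true
      · have hstep : pvStepA' (pre.map (· ++ "\n"), some q, ca) l =
            ((pre ++ [pvBlock q ca]).map (· ++ "\n"), some l, []) := by
          simp [pvStepA', h, pvBlock]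
        rw [List.foldl_cons, hstep, ih (pre ++ [pvBlock q ca]) l []]
        simp only [pvSpan]
        have h' : PySem.Str.endswith l "?" = true := by simpa using h
        rw [if_pos h', pvBlocks_cons]
        simp [pvBlock]
      · have hstep : pvStepA' (pre.map (· ++ "\n"), some q, ca) l =
            (pre.map (· ++ "\n"), some q, ca ++ [l]) := by
          simp [pvStepA', h]
        rw [List.foldl_cons, hstep, ih pre q (ca ++ [l])]
        simp [pvSpan, h]

theorem pvL0 (ls : List String) : ∀ ca : List String,
    pvFinish (ls.foldl pvStepA' ([], none, ca)) =
      PySem.Str.join "\n\n" (pvBlocks (ls.dropWhile (fun l => !PySem.Str.endswith l "?"))) := by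
  induction ls with
  | nil => intro ca; simp [pvFinish, pvBlocks, PySem.Str.join]
  | cons l ls ih =>
      intro ca
      by_cases h : PySem.Chars.endswith l.toList ['?'] = true
      · have hstep : pvStepA' ([], none, ca) l = ([], some l, []) := by
          simp [pvStepA', h]
        rw [List.foldl_cons, hstep]
        have := pvL1 ls [] l []
        simp only [List.map_nil, List.nil_append, List.nil_append] at this
        rw [this, List.dropWhile_cons_of_neg (by simp [h]), pvBlocks_cons]
        simp [pvBlock]
      · have hstep : pvStepA' ([], none, ca) l = ([], none, ca ++ [l]) := by
          simp [pvStepA', h]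
        rw [List.foldl_cons, hstep, ih (ca ++ [l]), List.dropWhile_cons_of_pos (by simp [h])]

-- ===== VERDICT =====
theorem format_faqs_spec : Claim_equal_format_faqs := by
  intro content _
  simp only [Spec_format_faqs, format_faqs, format_faqs_alt]
  rw [pvFold_strip]
  have := pvL0 ((((PySem.Str.split? content "\n").getD []).map PySem.Str.strip).filter (· ≠ "")) []
  simpa [pvFinish, pvBlock] using this
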